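-- pv_equiv track=rewrite | github.com/yashg16422-design/GSOC-FineGrainExp_Task | benchmarkingIO.py | build_chunked_index
-- ===== SOURCE A (Python) =====
-- def build_chunked_index(records, chunk_size):
--     index = []
--     chunk_id = 0
--     offset = 0
--
--     for i, record in enumerate(records):
--         if i % chunk_size == 0:
--             offset = 0
--             if i != 0:
--                 chunk_id += 1
--
--         size = len(record)
--         index.append((chunk_id, offset, size))
--         offset += size
--
--     return index
-- ===== SOURCE B (Python) =====
-- def build_chunked_index(records, chunk_size):
--     index = []
--     for cid, start in enumerate(range(0, len(records), chunk_size)):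
--         offset = 0
--         for record in records[start:start + chunk_size]:
--             index.append((cid, offset, len(record)))
--             offset += len(record)
--     return index
-- ===== Notes on version B (the rewrite author's own statement) =====
-- stated objective: alternative
-- what changed: A's single flat loop with an 'i % chunk_size == 0' boundary test is replaced by a chunk-by-chunk decomposition: an outer enumerate over range(0, len(records), chunk_size) of chunk starts and an inner loop over each chunk's slice that restarts the offset at 0; Pre_ excludes chunk_size == 0, where A raises ZeroDivisionError on non-empty records and B's range raises ValueError even on the empty list.
-- intended difference: For negative chunk_size with non-empty records A silently chunks by |chunk_size| — an artefact of Python's floored modulo making i % chunk_size == 0 at multiples of |chunk_size| — while B returns [], following range's own convention that a non-positive step from 0 upward selects no chunks; a negative chunk size is meaningless and B's empty index is the natural reading. — e.g. on build_chunked_index(["a"], -1): A returns [(0, 0, 1)], B returns []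
-- outside the precondition, e.g. on build_chunked_index([], 0): A returns [], B raises ValueError
import Mathlib
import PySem

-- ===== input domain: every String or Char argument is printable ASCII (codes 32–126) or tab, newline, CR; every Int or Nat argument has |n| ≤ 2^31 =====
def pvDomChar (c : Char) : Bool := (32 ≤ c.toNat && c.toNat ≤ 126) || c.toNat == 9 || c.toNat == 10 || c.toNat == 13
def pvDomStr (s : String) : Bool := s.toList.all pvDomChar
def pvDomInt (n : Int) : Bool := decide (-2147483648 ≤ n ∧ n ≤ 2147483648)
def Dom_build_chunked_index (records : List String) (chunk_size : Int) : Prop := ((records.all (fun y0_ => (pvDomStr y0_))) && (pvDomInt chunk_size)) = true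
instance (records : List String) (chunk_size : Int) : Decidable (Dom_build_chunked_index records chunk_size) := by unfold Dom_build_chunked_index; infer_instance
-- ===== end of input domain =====

-- B replaces A's flat boundary-test loop by a per-chunk decomposition (outer walk over chunk
-- starts, inner slice loop with a fresh offset); objective: alternative decomposition, same cost.


-- ===== PORT A =====
-- A's loop body: on a chunk boundary reset the offset and (except at i = 0) bump chunk_id.
def aStep (chunk_size : Int) (st : List (Int × Int × Int) × Int × Int) (p : Int × String) :
    List (Int × Int × Int) × Int × Int :=
  let (index, chunk_id, offset) := st
  let (i, record) := p
  let (chunk_id, offset) :=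
    if PySem.Int.mod i chunk_size = 0 then
      (if i ≠ 0 then chunk_id + 1 else chunk_id, (0 : Int))
    else (chunk_id, offset)
  let size := PySem.Str.len record
  (index ++ [(chunk_id, offset, size)], chunk_id, offset + size)

def build_chunked_index (records : List String) (chunk_size : Int) : List (Int × Int × Int) :=
  ((PySem.List.enumerate records).foldl (aStep chunk_size) ([], 0, 0)).1

-- ===== PORT B =====
-- inner loop of B: append (cid, offset, len record) and advance the offset
def bInner (cid : Int) (st : List (Int × Int × Int) × Int) (record : String) :
    List (Int × Int × Int) × Int :=
  (st.1 ++ [(cid, st.2, PySem.Str.len record)], st.2 + PySem.Str.len record)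

def build_chunked_index_alt (records : List String) (chunk_size : Int) : List (Int × Int × Int) :=
  (PySem.List.enumerate (PySem.List.pyRange 0 (records.length : Int) chunk_size)).foldl
    (fun index p =>
      ((PySem.List.slice records (some p.2) (some (p.2 + chunk_size))).foldl (bInner p.1) (index, 0)).1)
    []

-- ===== PRECONDITION & SPEC =====
-- Pre_ excludes chunk_size == 0: A raises ZeroDivisionError there on non-empty records, and
-- B's range(0, len(records), 0) raises ValueError even on the empty list (where A returns []).
def Pre_build_chunked_index (records : List String) (chunk_size : Int) : Prop := chunk_size ≠ 0
instance (records : List String) (chunk_size : Int) : Decidable (Pre_build_chunked_index records chunk_size) := by unfold Pre_build_chunked_index; infer_instance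

def pvWitness_build_chunked_index : List String × Int := (["ab", "c", "def"], 2)

-- For negative chunk_size with non-empty records A silently chunks by |chunk_size| (an artefact of
-- Python's floored modulo), while B returns []: range's convention that a non-positive step from 0
-- upward selects no chunks — the natural reading of a meaningless negative chunk size.
def D_build_chunked_index (records : List String) (chunk_size : Int) : Prop :=
  chunk_size < 0 ∧ records ≠ []
instance (records : List String) (chunk_size : Int) : Decidable (D_build_chunked_index records chunk_size) := by unfold D_build_chunked_index; infer_instance

def Spec_build_chunked_index (records : List String) (chunk_size : Int) (out : List (Int × Int × Int)) : Prop := ¬ D_build_chunked_index records chunk_size → out = build_chunked_index_alt records chunk_size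
instance (records : List String) (chunk_size : Int) (out : List (Int × Int × Int)) : Decidable (Spec_build_chunked_index records chunk_size out) := by unfold Spec_build_chunked_index; infer_instance

def pvDiffWitness_build_chunked_index : List String × Int := (["a"], -1)
def pvDiffWitnessOut_build_chunked_index : (List (Int × Int × Int)) × (List (Int × Int × Int)) :=
  ([(0, 0, 1)], [])

-- ===== CLAIM (what is proved, stated in full; the proofs are below) =====
def Claim_unchanged_build_chunked_index : Prop := ∀ (records : List String) (chunk_size : Int), Dom_build_chunked_index records chunk_size → Pre_build_chunked_index records chunk_size → Spec_build_chunked_index records chunk_size (build_chunked_index records chunk_size)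
def Claim_changed_build_chunked_index : Prop := Dom_build_chunked_index (pvDiffWitness_build_chunked_index.1) (pvDiffWitness_build_chunked_index.2) ∧ Pre_build_chunked_index (pvDiffWitness_build_chunked_index.1) (pvDiffWitness_build_chunked_index.2) ∧ D_build_chunked_index (pvDiffWitness_build_chunked_index.1) (pvDiffWitness_build_chunked_index.2) ∧ build_chunked_index (pvDiffWitness_build_chunked_index.1) (pvDiffWitness_build_chunked_index.2) = pvDiffWitnessOut_build_chunked_index.1 ∧ build_chunked_index_alt (pvDiffWitness_build_chunked_index.1) (pvDiffWitness_build_chunked_index.2) = pvDiffWitnessOut_build_chunked_index.2 ∧ pvDiffWitnessOut_build_chunked_index.1 ≠ pvDiffWitnessOut_build_chunked_index.2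
def Claim_exact_build_chunked_index : Prop := ∀ (records : List String) (chunk_size : Int), Dom_build_chunked_index records chunk_size → Pre_build_chunked_index records chunk_size → D_build_chunked_index records chunk_size → build_chunked_index records chunk_size ≠ build_chunked_index_alt records chunk_size

-- ===== LEMMAS AND PROOFS =====

-- Reference shape both ports are reduced to: one chunk of the records, entry by entry …
def innerRef (cid : Int) (off : Int) : List String → List (Int × Int × Int)
  | [] => []
  | r :: rs => (cid, off, PySem.Str.len r) :: innerRef cid (off + PySem.Str.len r) rs

-- … and the whole index, chunk by chunk; `S` is the chunk size MINUS ONE (so it terminates).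
def refIdx (S : Nat) (cid : Int) : List String → List (Int × Int × Int)
  | [] => []
  | r :: rs => innerRef cid 0 (r :: rs.take S) ++ refIdx S (cid + 1) (rs.drop S)
  termination_by l => l.length
  decreasing_by simp only [List.length_drop, List.length_cons]; omega

def sumLen (l : List String) : Int := (l.map PySem.Str.len).sum

lemma refIdx_nil (S : Nat) (cid : Int) : refIdx S cid [] = [] := by
  simp only [refIdx]

lemma refIdx_cons (S : Nat) (cid : Int) (r : String) (rs : List String) :
    refIdx S cid (r :: rs) = innerRef cid 0 (r :: rs.take S) ++ refIdx S (cid + 1) (rs.drop S) := by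
  simp only [refIdx]

-- A's loop across a stretch that contains no chunk boundary
lemma foldA_no_boundary (cs : Int) :
    ∀ (chunk : List String) (i0 : Int) (idx : List (Int × Int × Int)) (cid off : Int),
      (∀ j : Nat, j < chunk.length → ¬ cs ∣ (i0 + j)) →
      (PySem.List.enumerate chunk i0).foldl (aStep cs) (idx, cid, off)
        = (idx ++ innerRef cid off chunk, cid, off + sumLen chunk) := by
  intro chunk
  induction chunk with
  | nil => intro i0 idx cid off _h; simp [PySem.List.enumerate_nil, innerRef, sumLen]
  | cons r rs ih =>
      intro i0 idx cid off h
      have h0 : ¬ cs ∣ i0 := by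
        have := h 0 (by simp)
        simpa using this
      have hmod : ¬ PySem.Int.mod i0 cs = 0 := by
        rw [PySem.Int.mod_eq_zero_iff_dvd]; exact h0
      rw [PySem.List.enumerate_cons]
      simp only [List.foldl_cons]
      have hstep : aStep cs (idx, cid, off) (i0, r)
          = (idx ++ [(cid, off, PySem.Str.len r)], cid, off + PySem.Str.len r) := by
        simp [aStep, hmod]
      rw [hstep, ih (i0 + 1) _ cid (off + PySem.Str.len r) ?_]
      · simp [innerRef, sumLen, add_assoc]
      · intro j hj hdvd
        have hcast : i0 + 1 + (j : Int) = i0 + ((j + 1 : Nat) : Int) := by push_cast; ring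
        rw [hcast] at hdvd
        exact h (j + 1) (by simpa using Nat.succ_lt_succ hj) hdvd

-- A's loop over a suffix that starts at chunk boundary k*(S+1)
lemma foldA_chunks (cs : Int) (S : Nat) (hcs : cs.natAbs = S + 1) :
    ∀ (n : Nat) (recs : List String), recs.length ≤ n →
      ∀ (k : Nat) (idx : List (Int × Int × Int)) (cid off : Int),
      ((PySem.List.enumerate recs ((k * (S + 1) : Nat) : Int)).foldl (aStep cs) (idx, cid, off)).1
        = idx ++ refIdx S (if k = 0 then cid else cid + 1) recs := by
  intro n
  induction n with
  | zero =>
      intro recs hlen k idx cid off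
      have : recs = [] := List.eq_nil_of_length_eq_zero (Nat.le_zero.mp hlen)
      subst this
      simp [PySem.List.enumerate_nil, refIdx_nil]
  | succ n ih =>
      intro recs hlen k idx cid off
      match recs with
      | [] => simp [PySem.List.enumerate_nil, refIdx_nil]
      | r :: rs =>
        have hSpos : (0:Nat) < S + 1 := Nat.succ_pos S
        have hdvdS : cs ∣ ((S + 1 : Nat) : Int) := by
          rw [← hcs]; exact Int.dvd_natAbs.mpr dvd_rfl
        have hdvd : cs ∣ ((k * (S + 1) : Nat) : Int) := by
          have : ((k * (S + 1) : Nat) : Int) = ((S + 1 : Nat) : Int) * (k : Int) := by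
            push_cast; ring
          rw [this]; exact Dvd.dvd.mul_right hdvdS _
        have hmod : PySem.Int.mod ((k * (S + 1) : Nat) : Int) cs = 0 :=
          (PySem.Int.mod_eq_zero_iff_dvd _ _).mpr hdvd
        have hcid : (if ((k * (S + 1) : Nat) : Int) ≠ 0 then cid + 1 else cid)
            = (if k = 0 then cid else cid + 1) := by
          by_cases hk : k = 0
          · subst hk; simp
          · have hne : k * (S + 1) ≠ 0 := Nat.mul_ne_zero hk (Nat.succ_ne_zero S)
            simp only [ne_eq, Nat.cast_eq_zero, hne, not_false_eq_true, if_true]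
            rw [if_neg hk]
        rw [PySem.List.enumerate_cons]
        simp only [List.foldl_cons]
        have hstep : aStep cs (idx, cid, off) (((k * (S + 1) : Nat) : Int), r)
            = (idx ++ [((if k = 0 then cid else cid + 1), 0, PySem.Str.len r)],
               (if k = 0 then cid else cid + 1), 0 + PySem.Str.len r) := by
          simp only [aStep, if_pos hmod, hcid]
        rw [hstep]
        -- split the remaining records at the next chunk boundary
        conv_lhs => rw [← List.take_append_drop S rs]
        rw [PySem.List.enumerate_append, List.foldl_append]
        have hnb : ∀ j : Nat, j < (rs.take S).length →
            ¬ cs ∣ (((k * (S + 1) : Nat) : Int) + 1 + (j : Int)) := by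
          intro j hj hdvdj
          have hjS : j < S := by
            rw [List.length_take] at hj
            omega
          have hcast : ((k * (S + 1) : Nat) : Int) + 1 + (j : Int)
              = ((k * (S + 1) + (1 + j) : Nat) : Int) := by push_cast; ring
          rw [hcast] at hdvdj
          have hN : (S + 1) ∣ (k * (S + 1) + (1 + j)) := by
            have := (Int.natAbs_dvd (a := cs)).mpr hdvdj
            rw [hcs] at this
            exact Int.natCast_dvd_natCast.mp this
          have hN2 : (S + 1) ∣ (1 + j) :=
            (Nat.dvd_add_right ⟨k, by ring⟩).mp hN
          have := Nat.le_of_dvd (by omega) hN2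
          omega
        rw [foldA_no_boundary cs (rs.take S) _ _ _ _ hnb]
        by_cases hD : rs.drop S = []
        · simp [hD, PySem.List.enumerate_nil, refIdx_cons, refIdx_nil, innerRef,
            List.append_assoc]
        · have hlen' : S < rs.length := by
            by_contra hc
            exact hD (List.drop_eq_nil_of_le (by omega))
          have htk : (rs.take S).length = S := by
            rw [List.length_take]; omega
          have hstart : ((k * (S + 1) : Nat) : Int) + 1 + ((rs.take S).length : Int)
              = (((k + 1) * (S + 1) : Nat) : Int) := by
            rw [htk]; push_cast; ring
          have hlen2 : (rs.drop S).length ≤ n := by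
            simp only [List.length_cons] at hlen
            rw [List.length_drop]
            omega
          rw [hstart, ih (rs.drop S) hlen2 (k + 1) _ _ _,
            if_neg (Nat.succ_ne_zero k)]
          simp [refIdx_cons, innerRef, List.append_assoc]

-- B's inner loop is innerRef
lemma foldB_inner (cid : Int) :
    ∀ (chunk : List String) (idx : List (Int × Int × Int)) (off : Int),
      chunk.foldl (bInner cid) (idx, off) = (idx ++ innerRef cid off chunk, off + sumLen chunk) := by
  intro chunk
  induction chunk with
  | nil => intro idx off; simp [innerRef, sumLen]
  | cons r rs ih =>
      intro idx off
      simp only [List.foldl_cons, bInner, innerRef, sumLen, List.map_cons, List.sum_cons, ih]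
      simp [add_assoc]

-- B's outer loop, peeled chunk start by chunk start
lemma foldB_chunks (full : List String) (S : Nat) (m : Nat)
    (hm : m = (full.length + S) / (S + 1)) :
    ∀ (cnt k : Nat) (idx : List (Int × Int × Int)), k + cnt = m →
      (PySem.List.enumerate
          ((List.range' k cnt).map (fun j : Nat => (0 : Int) + ((S + 1 : Nat) : Int) * (j : Int)))
          (k : Int)).foldl
        (fun index p =>
          ((PySem.List.slice full (some p.2) (some (p.2 + ((S + 1 : Nat) : Int)))).foldl
            (bInner p.1) (index, 0)).1)
        idx
        = idx ++ refIdx S (k : Int) (full.drop (k * (S + 1))) := by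
  intro cnt
  induction cnt with
  | zero =>
      intro k idx hk
      have hL : full.length ≤ k * (S + 1) := by
        subst hm
        have h2 : (full.length + S) / (S + 1) < k + 1 := by omega
        have h3 := (Nat.div_lt_iff_lt_mul (by omega : 0 < S + 1)).mp h2
        have hmul : (k + 1) * (S + 1) = k * (S + 1) + (S + 1) := by ring
        omega
      rw [List.drop_eq_nil_of_le hL]
      simp [PySem.List.enumerate_nil, refIdx_nil]
  | succ cnt ih =>
      intro k idx hk
      have hlt : k * (S + 1) < full.length := by
        subst hm
        have h1 : k + 1 ≤ (full.length + S) / (S + 1) := by omega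
        have h2 := (Nat.le_div_iff_mul_le (by omega : 0 < S + 1)).mp h1
        have hmul : (k + 1) * (S + 1) = k * (S + 1) + (S + 1) := by ring
        omega
      obtain ⟨r, rest, hdr⟩ : ∃ r rest, full.drop (k * (S + 1)) = r :: rest := by
        cases hD : full.drop (k * (S + 1)) with
        | nil =>
            exfalso
            have h1 : (full.drop (k * (S + 1))).length = full.length - k * (S + 1) :=
              List.length_drop
            rw [hD] at h1
            simp at h1
            omega
        | cons a b => exact ⟨a, b, rfl⟩
      rw [List.range'_succ]
      simp only [List.map_cons]
      rw [PySem.List.enumerate_cons]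
      simp only [List.foldl_cons]
      have hstart : (0 : Int) + ((S + 1 : Nat) : Int) * (k : Int)
          = ((k * (S + 1) : Nat) : Int) := by push_cast; ring
      rw [hstart, PySem.List.slice_natCast_add full (k * (S + 1)) (S + 1), hdr,
        List.take_succ_cons, foldB_inner]
      have hcast : (k : Int) + 1 = ((k + 1 : Nat) : Int) := by push_cast; ring
      rw [hcast, ih (k + 1) _ (by omega)]
      have hdrop2 : full.drop ((k + 1) * (S + 1)) = rest.drop S := by
        have hmul : (k + 1) * (S + 1) = k * (S + 1) + (S + 1) := by ring
        rw [hmul, ← List.drop_drop, hdr, List.drop_succ_cons]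
      rw [hdrop2, refIdx_cons, hcast, List.append_assoc]

-- the count of chunks B's range produces, as a Nat
lemma count_eq (L S : Nat) :
    (if (0 : Int) < (L : Int) then
        (((L : Int) - 0 + ((S + 1 : Nat) : Int) - 1) / ((S + 1 : Nat) : Int)).toNat
      else 0) = (L + S) / (S + 1) := by
  by_cases hL : 0 < L
  · have h1 : ((L : Int) - 0 + ((S + 1 : Nat) : Int) - 1) = ((L + S : Nat) : Int) := by
      push_cast; ring
    rw [if_pos (by exact_mod_cast hL), h1, ← Int.natCast_ediv, Int.toNat_natCast]
  · have hL0 : L = 0 := by omega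
    subst hL0
    rw [if_neg (by norm_num)]
    rw [Nat.div_eq_of_lt (by omega)]

-- a negative step starting at 0 towards a nonnegative stop yields the empty range
lemma pyRange_neg_nil (n cs : Int) (hcs : cs < 0) (hn : 0 ≤ n) :
    PySem.List.pyRange 0 n cs = [] := by
  unfold PySem.List.pyRange
  rw [if_neg (by omega : ¬ cs = 0)]
  rw [if_neg (by omega : ¬ 0 < cs), if_neg (by omega : ¬ n < 0)]
  simp

-- A appends exactly one triple per record, whatever the branches do
lemma foldA_length (cs : Int) :
    ∀ (l : List String) (i0 : Int) (idx : List (Int × Int × Int)) (cid off : Int),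
      (((PySem.List.enumerate l i0).foldl (aStep cs) (idx, cid, off)).1).length
        = idx.length + l.length := by
  intro l
  induction l with
  | nil => intro i0 idx cid off; simp [PySem.List.enumerate_nil]
  | cons r rs ih =>
      intro i0 idx cid off
      rw [PySem.List.enumerate_cons]
      simp only [List.foldl_cons, aStep]
      split_ifs <;>
        simp [ih, List.length_append] <;> omega

-- ===== VERDICT (by name: the statements are the Claim_ definitions above) =====
theorem build_chunked_index_spec : Claim_unchanged_build_chunked_index := by
  intro records cs _hdom hpre
  unfold Spec_build_chunked_index
  intro hnD
  rcases lt_trichotomy cs 0 with hneg | hz | hpos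
  · -- ¬ D_ with cs < 0 forces records = []
    have hrec : records = [] := by
      by_contra hne
      exact hnD ⟨hneg, hne⟩
    subst hrec
    simp [build_chunked_index, build_chunked_index_alt, PySem.List.enumerate_nil,
      pyRange_neg_nil 0 cs hneg le_rfl]
  · exact absurd hz hpre
  · obtain ⟨S, hcs⟩ : ∃ S, cs.natAbs = S + 1 := by
      have : cs.natAbs ≠ 0 := Int.natAbs_ne_zero.mpr hpre
      exact ⟨cs.natAbs - 1, by omega⟩
    have hA : build_chunked_index records cs = refIdx S 0 records := by
      unfold build_chunked_index
      rw [show PySem.List.enumerate records = PySem.List.enumerate records ((0 * (S + 1) : Nat) : Int) by norm_num]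
      rw [foldA_chunks cs S hcs records.length records le_rfl 0 [] 0 0]
      simp
    have hcs' : cs = ((S + 1 : Nat) : Int) := by
      have := Int.natAbs_of_nonneg (le_of_lt hpos)
      omega
    have hB : build_chunked_index_alt records cs = refIdx S 0 records := by
      simp only [build_chunked_index_alt, hcs']
      rw [PySem.List.pyRange_of_pos 0 (records.length : Int) (by exact_mod_cast Nat.succ_pos S)]
      rw [count_eq records.length S, List.range_eq_range']
      rw [show ∀ (l : List Int), PySem.List.enumerate l = PySem.List.enumerate l (((0 : Nat) : Int))
          from fun l => by norm_num]
      rw [foldB_chunks records S ((records.length + S) / (S + 1)) rfl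
        ((records.length + S) / (S + 1)) 0 [] (by omega)]
      simp
    rw [hA, hB]

theorem build_chunked_index_changed : Claim_changed_build_chunked_index := by
  unfold Claim_changed_build_chunked_index; decide

theorem build_chunked_index_tight : Claim_exact_build_chunked_index := by
  intro records cs _hdom _hpre hD
  obtain ⟨hneg, hne⟩ := hD
  have hB : build_chunked_index_alt records cs = [] := by
    simp [build_chunked_index_alt, pyRange_neg_nil (records.length : Int) cs hneg
      (by exact_mod_cast Nat.zero_le _), PySem.List.enumerate_nil]
  rw [hB]
  intro hA
  have hlen := foldA_length cs records 0 [] 0 0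
  unfold build_chunked_index at hA
  rw [hA] at hlen
  simp at hlen
  exact hne (List.eq_nil_of_length_eq_zero hlen.symm)
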